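-- pv_equiv track=rewrite | github.com/T1nt1nBehl/flow-core | generators/generate_all.py | collapse_multiline_inserts
-- ===== SOURCE A (Python) =====
-- def collapse_multiline_inserts(lines):
--     """
--     Post-processor: collapse split INSERT … VALUES / continuation patterns
--     into single self-contained statements.
--
--     Pattern emitted by the inline pg() calls:
--         INSERT INTO foo (cols) VALUES          <- no semicolon at end
--           (val1, val2, ...);                   <- continuation with semicolon
--
--     Collapsed to:
--         INSERT INTO foo (cols) VALUES (val1, val2, ...);
--
--     Orphan guard: if a bare VALUES header is immediately followed by a
--     non-data line (another INSERT, COMMIT, SET, comment) the header is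
--     dropped — but the triggering line is NOT consumed; the outer loop
--     processes it normally on the next iteration.
--     """
--     out = []
--     i = 0
--     while i < len(lines):
--         line = lines[i]
--         stripped = line.rstrip()
--
--         # Detect a multi-line INSERT: VALUES with no semicolon and no opening paren
--         if (stripped.upper().startswith('INSERT INTO') and
--                 'VALUES' in stripped.upper() and
--                 not stripped.endswith(';') and
--                 not stripped.endswith('(')):
--
--             combined = stripped
--             j = i + 1
--             orphan = False
--
--             while j < len(lines):
--                 cont = lines[j].strip()
--                 if not cont:        # skip blank lines in lookahead
--                     j += 1
--                     continue
--
--                 # If the next non-blank line is NOT a data row (i.e. starts with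
--                 # a SQL keyword or comment), the VALUES header is an orphan.
--                 # Do NOT advance j — leave it for the outer loop to emit normally.
--                 if (cont.upper().startswith('INSERT') or
--                         cont.upper().startswith('COMMIT') or
--                         cont.upper().startswith('SET ') or
--                         cont.upper().startswith('--')):
--                     orphan = True
--                     # i advances to j so outer loop picks up the keyword line next
--                     i = j
--                     break
--
--                 # Merge continuation data row
--                 combined = combined + ' ' + cont
--                 j += 1
--                 if cont.endswith(';'):
--                     i = j
--                     break
--             else:
--                 i = j  # exhausted lines
--
--             if not orphan:
--                 out.append(combined)
--             # if orphan: discard just the bare header; outer loop handles keyword at new i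
--
--         else:
--             out.append(stripped)
--             i += 1
--
--     return out
-- ===== SOURCE B (Python) =====
-- def collapse_multiline_inserts(lines):
--     """Single flat pass with a `pending` half-built header instead of an
--     index-based outer loop with a nested lookahead scan."""
--     out = []
--     pending = None
--     for raw in lines:
--         if pending is not None:
--             cont = raw.strip()
--             if not cont:
--                 continue
--             if (cont.upper().startswith('INSERT') or
--                     cont.upper().startswith('COMMIT') or
--                     cont.upper().startswith('SET ') or
--                     cont.upper().startswith('--')):
--                 pending = None          # orphan header dropped; fall through
--             else:
--                 pending = pending + ' ' + cont
--                 if cont.endswith(';'):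
--                     out.append(pending)
--                     pending = None
--                 continue
--         stripped = raw.rstrip()
--         if (stripped.upper().startswith('INSERT INTO') and
--                 'VALUES' in stripped.upper() and
--                 not stripped.endswith(';') and
--                 not stripped.endswith('(')):
--             pending = stripped
--         else:
--             out.append(stripped)
--     if pending is not None:
--         out.append(pending)
--     return out
-- ===== Notes on version B (the rewrite author's own statement) =====
-- stated objective: simpler
-- what changed: Replaced A's index-based outer while-loop with a nested lookahead scan (and i=j back-patching) by a single flat pass over the lines carrying a `pending` half-built header, flushed on ';' or at EOF and dropped (with immediate re-handling of the trigger line) on orphan triggers.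
import Mathlib
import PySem

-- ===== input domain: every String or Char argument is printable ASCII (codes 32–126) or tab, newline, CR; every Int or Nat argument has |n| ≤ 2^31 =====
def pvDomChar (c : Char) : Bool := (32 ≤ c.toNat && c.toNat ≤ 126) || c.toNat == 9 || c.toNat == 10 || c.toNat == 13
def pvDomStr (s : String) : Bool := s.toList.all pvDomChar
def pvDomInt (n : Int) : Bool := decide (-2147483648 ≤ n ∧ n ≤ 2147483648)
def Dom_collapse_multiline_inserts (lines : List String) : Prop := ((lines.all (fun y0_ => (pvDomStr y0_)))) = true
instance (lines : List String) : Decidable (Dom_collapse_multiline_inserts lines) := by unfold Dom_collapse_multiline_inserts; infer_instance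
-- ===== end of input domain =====

-- B replaces A's outer while-loop with nested lookahead scan by a single
-- flat pass carrying a `pending` half-built header (objective: simpler).


-- ===== PORT A =====
-- shared condition helpers: both Pythons contain these identical condition texts
def pvIsHeader (s : String) : Bool :=
  PySem.Str.startswith (PySem.Str.upper s) "INSERT INTO"
  && PySem.Str.isIn "VALUES" (PySem.Str.upper s)
  && !(PySem.Str.endswith s ";")
  && !(PySem.Str.endswith s "(")

def pvIsTrigger (c : String) : Bool :=
  PySem.Str.startswith (PySem.Str.upper c) "INSERT"
  || PySem.Str.startswith (PySem.Str.upper c) "COMMIT"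
  || PySem.Str.startswith (PySem.Str.upper c) "SET "
  || PySem.Str.startswith (PySem.Str.upper c) "--"

-- A's inner lookahead loop over the suffix after the header (the index j of
-- the Python is represented by the suffix lines[j:]): returns
-- (combined, remaining suffix = lines[i':], orphan flag)
def pvScanA (combined : String) : List String → String × List String × Bool
  | [] => (combined, [], false)
  | l :: rest =>
      let cont := PySem.Str.strip l
      if cont = "" then pvScanA combined rest
      else if pvIsTrigger cont then (combined, l :: rest, true)
      else
        let combined' := combined ++ " " ++ cont
        if PySem.Str.endswith cont ";" then (combined', rest, false)
        else pvScanA combined' rest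

-- A's outer while-loop over the suffix lines[i:]; fuel only makes the jump
-- i = j (continuing at the suffix pvScanA returns) total — it is never
-- exhausted when fuel ≥ length (out.append becomes cons-on-return)
def pvLoopA (fuel : Nat) (ls : List String) : List String :=
  match fuel, ls with
  | _, [] => []
  | 0, _ :: _ => []
  | fuel + 1, l :: rest =>
      let stripped := PySem.Str.rstrip l
      if pvIsHeader stripped then
        let r := pvScanA stripped rest
        if r.2.2 then pvLoopA fuel r.2.1
        else r.1 :: pvLoopA fuel r.2.1
      else stripped :: pvLoopA fuel rest

def collapse_multiline_inserts (lines : List String) : List String :=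
  pvLoopA lines.length lines

-- ===== PORT B =====
-- B's flat pass: `pending` holds the half-built header; the orphan case
-- re-handles the current line with pending cleared (that code is inlined).
def pvGoB : List String → Option String → List String
  | [], none => []
  | [], some p => [p]
  | raw :: rest, some p =>
      let cont := PySem.Str.strip raw
      if cont = "" then pvGoB rest (some p)
      else if pvIsTrigger cont then
        let stripped := PySem.Str.rstrip raw
        if pvIsHeader stripped then pvGoB rest (some stripped)
        else stripped :: pvGoB rest none
      else
        let p' := p ++ " " ++ cont
        if PySem.Str.endswith cont ";" then p' :: pvGoB rest none
        else pvGoB rest (some p')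
  | raw :: rest, none =>
      let stripped := PySem.Str.rstrip raw
      if pvIsHeader stripped then pvGoB rest (some stripped)
      else stripped :: pvGoB rest none

def collapse_multiline_inserts_alt (lines : List String) : List String :=
  pvGoB lines none

-- ===== PRECONDITION & SPEC =====
def Spec_collapse_multiline_inserts (lines : List String) (out : List String) : Prop := out = collapse_multiline_inserts_alt lines
instance (lines : List String) (out : List String) : Decidable (Spec_collapse_multiline_inserts lines out) := by unfold Spec_collapse_multiline_inserts; infer_instance

-- ===== CLAIM (what is proved, stated in full; the proofs are below) =====
def Claim_equal_collapse_multiline_inserts : Prop := ∀ (lines : List String), Dom_collapse_multiline_inserts lines → Spec_collapse_multiline_inserts lines (collapse_multiline_inserts lines)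

-- ===== LEMMAS AND PROOFS =====

-- A's lookahead never lengthens the remaining suffix
theorem pvScanA_length_le (c : String) (ls : List String) :
    (pvScanA c ls).2.1.length ≤ ls.length := by
  induction ls generalizing c with
  | nil => simp [pvScanA]
  | cons l rest ih =>
      rw [pvScanA]
      dsimp only
      split
      · exact le_trans (ih c) (by simp)
      · split
        · simp
        · split
          · simp
          · exact le_trans (ih _) (by simp)

-- B's pass with `pending = some c` computes exactly what A's lookahead scan
-- computes, then continues pending-free on the suffix the scan leaves.
theorem pvGoB_some_eq_scan (c : String) (ls : List String) :
    pvGoB ls (some c) =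
      (let r := pvScanA c ls;
       if r.2.2 then pvGoB r.2.1 none
       else r.1 :: pvGoB r.2.1 none) := by
  induction ls generalizing c with
  | nil => simp [pvGoB, pvScanA]
  | cons l rest ih =>
      rw [pvGoB, pvScanA]
      dsimp only
      by_cases hb : PySem.Str.strip l = ""
      · rw [if_pos hb, if_pos hb, ih c]
      · rw [if_neg hb, if_neg hb]
        by_cases ht : pvIsTrigger (PySem.Str.strip l) = true
        · rw [if_pos ht, if_pos ht]
          simp only [if_true]
          rw [pvGoB]
        · rw [if_neg ht, if_neg ht]
          by_cases hs : PySem.Str.endswith (PySem.Str.strip l) ";" = true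
          · rw [if_pos hs, if_pos hs]
            simp
          · rw [if_neg hs, if_neg hs, ih]

theorem pvLoopA_eq_goB (fuel : Nat) (ls : List String) (hf : ls.length ≤ fuel) :
    pvLoopA fuel ls = pvGoB ls none := by
  induction fuel generalizing ls with
  | zero =>
      cases ls with
      | nil => simp [pvLoopA, pvGoB]
      | cons l rest => simp at hf
  | succ fuel ih =>
      cases ls with
      | nil => simp [pvLoopA, pvGoB]
      | cons l rest =>
          rw [pvLoopA, pvGoB]
          dsimp only
          by_cases hh : pvIsHeader (PySem.Str.rstrip l) = true
          · rw [if_pos hh, if_pos hh]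
            have hlen := pvScanA_length_le (PySem.Str.rstrip l) rest
            have hr : (pvScanA (PySem.Str.rstrip l) rest).2.1.length ≤ fuel := by
              simp at hf; omega
            rw [pvGoB_some_eq_scan]
            dsimp only
            split
            · exact ih _ hr
            · rw [ih _ hr]
          · rw [if_neg hh, if_neg hh]
            rw [ih rest (by simp at hf; omega)]

-- ===== VERDICT (by name: the statement is the Claim_ definition above) =====
theorem collapse_multiline_inserts_spec : Claim_equal_collapse_multiline_inserts := by
  intro lines _
  unfold Spec_collapse_multiline_inserts collapse_multiline_inserts collapse_multiline_inserts_alt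
  exact pvLoopA_eq_goB lines.length lines le_rfl
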